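-- pv_equiv track=rewrite | github.com/leoSantos037/revisao-aula10 | aula10_1.py | num_of_characters
-- ===== SOURCE A (Python) =====
-- def num_of_characters(text):
--   total_count = len(text)   #  a quantidde total de caracteres incluindo tudo, inclusive espaços e pontuação
--   spaces = 0
--   punctuations = 0
--
--   for each_letter in text:
--     if each_letter == ' ':
--       spaces += 1
--
--     if each_letter == '.' or each_letter == ',' or each_letter == '!' or each_letter == '?':
--       punctuations += 1
--
--   #  de total_count vamos subtrair quantos espaços e quantas pontuações
--   letters_count = total_count - spaces - punctuations
--
--   #  a funcao retornara 3 valores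
--   return letters_count, spaces, punctuations
-- ===== SOURCE B (Python) =====
-- def num_of_characters(text):
--   # tabulate-then-query: build a full character frequency table once, then
--   # read the three answers off it by keyed lookups
--   counts = {}
--   for ch in text:
--     counts[ch] = counts.get(ch, 0) + 1
--   spaces = counts.get(' ', 0)
--   punctuations = sum(counts.get(p, 0) for p in '.,!?')
--   return len(text) - spaces - punctuations, spaces, punctuations
-- ===== Notes on version B (the rewrite author's own statement) =====
-- stated objective: alternative
-- what changed: Replaces A's per-character conditional counters with a tabulate-then-query pass: a full frequency table is built once and spaces/punctuation are derived by keyed lookups.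
import Mathlib
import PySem

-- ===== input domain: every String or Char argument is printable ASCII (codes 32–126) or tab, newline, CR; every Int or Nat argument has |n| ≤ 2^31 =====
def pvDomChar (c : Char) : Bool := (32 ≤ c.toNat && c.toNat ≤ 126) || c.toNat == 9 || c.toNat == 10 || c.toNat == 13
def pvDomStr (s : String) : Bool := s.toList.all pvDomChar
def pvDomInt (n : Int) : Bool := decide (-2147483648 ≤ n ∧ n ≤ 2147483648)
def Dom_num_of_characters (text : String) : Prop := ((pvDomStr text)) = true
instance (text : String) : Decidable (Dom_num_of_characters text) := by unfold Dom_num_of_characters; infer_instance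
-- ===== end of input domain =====

-- B builds a full frequency table once and derives the three answers by keyed lookups
-- (alternative decomposition; same O(n) cost as A's per-character conditional counters).

-- ===== PORT A =====
def num_of_characters (text : String) : Int × Int × Int :=
  let total_count : Int := PySem.Str.len text
  let sp : Int × Int := text.toList.foldl (fun (acc : Int × Int) each_letter =>
    let spaces := if each_letter == ' ' then acc.1 + 1 else acc.1
    let punctuations :=
      if each_letter == '.' || each_letter == ',' || each_letter == '!' || each_letter == '?'
      then acc.2 + 1 else acc.2
    (spaces, punctuations)) (0, 0)
  (total_count - sp.1 - sp.2, sp.1, sp.2)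

-- ===== PORT B =====
def num_of_characters_alt (text : String) : Int × Int × Int :=
  let counts : PySem.Dict Char Int :=
    text.toList.foldl (fun d ch => d.insert ch (d.getD ch 0 + 1)) PySem.Dict.empty
  let spaces : Int := counts.getD ' ' 0
  let punctuations : Int := ['.', ',', '!', '?'].foldl (fun s p => s + counts.getD p 0) 0
  (PySem.Str.len text - spaces - punctuations, spaces, punctuations)

-- ===== PRECONDITION & SPEC =====
def Spec_num_of_characters (text : String) (out : Int × Int × Int) : Prop := out = num_of_characters_alt text
instance (text : String) (out : Int × Int × Int) : Decidable (Spec_num_of_characters text out) := by unfold Spec_num_of_characters; infer_instance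

-- ===== CLAIM (what is proved, stated in full; the proofs are below) =====
def Claim_equal_num_of_characters : Prop := ∀ (text : String), Dom_num_of_characters text → Spec_num_of_characters text (num_of_characters text)

-- ===== LEMMAS AND PROOFS =====

-- A's single loop carries both counters: its result is the two membership counts.
lemma loopA_eq (l : List Char) (a b : Int) :
    l.foldl (fun (acc : Int × Int) each_letter =>
      let spaces := if each_letter == ' ' then acc.1 + 1 else acc.1
      let punctuations :=
        if each_letter == '.' || each_letter == ',' || each_letter == '!' || each_letter == '?'
        then acc.2 + 1 else acc.2
      (spaces, punctuations)) (a, b)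
    = (a + (l.count ' ' : Int),
       b + (l.count '.' : Int) + l.count ',' + l.count '!' + l.count '?') := by
  induction l generalizing a b with
  | nil => simp
  | cons c t ih =>
    simp only [List.foldl_cons, ih, List.count_cons]
    by_cases h1 : c = ' ' <;> by_cases h2 : c = '.' <;> by_cases h3 : c = ','
      <;> by_cases h4 : c = '!' <;> by_cases h5 : c = '?'
      <;> simp_all <;> ring

theorem num_of_characters_spec : Claim_equal_num_of_characters := by
  intro text _
  unfold Spec_num_of_characters num_of_characters num_of_characters_alt
  simp only [loopA_eq, PySem.Dict.getD_foldl_insert_add_one, List.foldl_cons, List.foldl_nil]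
  simp [PySem.Dict.empty, PySem.Dict.getD, PySem.Dict.get?]
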